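-- pv_equiv track=rewrite | github.com/arpitkapadia/leetcode | rm_dup_sorted_arr.py | findLastIndex
-- ===== SOURCE A (Python) =====
-- def findLastIndex(nums, index):
--     start = index + 1
--     end = len(nums)
--     if(start >= end):
--         return index
--     while (start < end):
--         if(nums[start] != nums[index]):
--             return start - 1
--         start += 1
--     return start - 1
-- ===== SOURCE B (Python) =====
-- def findLastIndex(nums, index):
--     n = len(nums)
--     if index + 1 >= n:
--         return index
--     i = index + n if index < 0 else index  # Python negative-index position
--     # run-length decomposition: end position of every maximal run of equal adjacent elements
--     ends = [j - 1 for j in range(1, n) if nums[j] != nums[j - 1]]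
--     ends.append(n - 1)
--     # the run containing position i ends at the first run end >= i
--     for e in ends:
--         if e >= i:
--             return e
--     return n - 1  # unreachable: ends[-1] == n-1 >= i
-- ===== Notes on version B (the rewrite author's own statement) =====
-- stated objective: alternative
-- what changed: B replaces A's anchored early-exit scan (compare each next element to nums[index], return at the first mismatch) by a run-length decomposition: one adjacent-pair pass builds the table of run-end positions of the whole array, and the answer is the first run end at or after the (negative-index-normalised) position; the hinted binary search was not used because A does not require a sorted array.
-- intended difference: On a negative in-range index into a non-constant list, A keeps scanning with its raw counter (wrapping through the end of the list and then rescanning from the front) and returns an accidental raw-counter value such as -2; B returns the end of the run containing the Python position index+len(nums), the intended answer under Python's negative-index convention. — e.g. on findLastIndex([1, 2], -2): A returns -2, B returns 0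
import Mathlib
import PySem

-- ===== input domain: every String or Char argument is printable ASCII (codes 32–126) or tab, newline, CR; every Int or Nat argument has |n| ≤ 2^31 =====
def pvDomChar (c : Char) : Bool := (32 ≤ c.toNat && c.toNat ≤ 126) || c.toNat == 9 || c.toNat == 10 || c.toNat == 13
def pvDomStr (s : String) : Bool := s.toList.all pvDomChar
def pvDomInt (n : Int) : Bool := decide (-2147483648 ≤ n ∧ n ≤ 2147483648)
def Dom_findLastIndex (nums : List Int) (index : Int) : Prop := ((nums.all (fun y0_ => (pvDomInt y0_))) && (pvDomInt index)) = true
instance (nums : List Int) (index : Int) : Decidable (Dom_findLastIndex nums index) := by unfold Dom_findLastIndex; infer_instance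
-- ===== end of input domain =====

-- B replaces A's anchored early-exit scan by a run-length decomposition of the whole array
-- (table of run-end positions) followed by a first-run-end-≥-position lookup (objective: alternative).

-- ===== PORT A =====
-- while loop ported with fuel (end - start).toNat; indexing via PySem.List.pyGet?
-- (out-of-range access = Python IndexError, excluded by Pre_; there the port returns start-1).
def findLastIndexLoopA (nums : List Int) (index fin : Int) : Int → Nat → Int
  | start, 0 => start - 1
  | start, Nat.succ fuel =>
    if start < fin then
      if PySem.List.pyGet? nums start ≠ PySem.List.pyGet? nums index then start - 1
      else findLastIndexLoopA nums index fin (start + 1) fuel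
    else start - 1

def findLastIndex (nums : List Int) (index : Int) : Int :=
  let start := index + 1
  let fin : Int := nums.length
  if start ≥ fin then index
  else findLastIndexLoopA nums index fin start (fin - start).toNat

-- ===== PORT B =====
-- 'for e in ends: if e >= i: return e' with trailing 'return n - 1' (unreachable in Python).
def altFirstGe (i dflt : Int) : List Int → Int
  | [] => dflt
  | e :: rest => if e ≥ i then e else altFirstGe i dflt rest

-- '[j - 1 for j in range(1, n) if nums[j] != nums[j - 1]]' then '.append(n - 1)'
def altEnds (nums : List Int) (n : Int) : List Int :=
  ((PySem.List.pyRange 1 n 1).filter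
      (fun j => decide (PySem.List.pyGet? nums j ≠ PySem.List.pyGet? nums (j - 1)))).map (fun j => j - 1)
    ++ [n - 1]

def findLastIndex_alt (nums : List Int) (index : Int) : Int :=
  let n : Int := nums.length
  if index + 1 ≥ n then index
  else
    let i := if index < 0 then index + n else index
    altFirstGe i (n - 1) (altEnds nums n)

-- ===== PRECONDITION & SPEC =====
-- Pre_ excludes exactly the inputs where Python A raises IndexError:
-- index < -len(nums) while the scan is entered (index + 1 < len(nums)).
def Pre_findLastIndex (nums : List Int) (index : Int) : Prop :=
  (nums.length : Int) ≤ index + 1 ∨ -(nums.length : Int) ≤ index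
instance (nums : List Int) (index : Int) : Decidable (Pre_findLastIndex nums index) := by
  unfold Pre_findLastIndex; infer_instance

def pvWitness_findLastIndex : List Int × Int := ([1, 1, 2], 0)

-- On a negative in-range index into a non-constant list A scans raw positions index+1, index+2, …
-- (wrapping through the end of the list and then rescanning it from the front) and returns a raw
-- counter value such as -2; B returns the end position of the run containing the Python position
-- index + len(nums), which is the intended answer under Python's negative-index convention.
def D_findLastIndex (nums : List Int) (index : Int) : Prop :=
  nums ≠ [] ∧ -(nums.length : Int) ≤ index ∧ index < 0 ∧ ¬ (∀ x ∈ nums, x = nums.getD 0 0)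
instance (nums : List Int) (index : Int) : Decidable (D_findLastIndex nums index) := by
  unfold D_findLastIndex; infer_instance

def Spec_findLastIndex (nums : List Int) (index : Int) (out : Int) : Prop :=
  ¬ D_findLastIndex nums index → out = findLastIndex_alt nums index
instance (nums : List Int) (index : Int) (out : Int) : Decidable (Spec_findLastIndex nums index out) := by unfold Spec_findLastIndex; infer_instance

def pvDiffWitness_findLastIndex : List Int × Int := ([1, 2], -2)
def pvDiffWitnessOut_findLastIndex : Int × Int := (-2, 0)

-- ===== CLAIM (what is proved, stated in full; the proofs are below) =====
def Claim_unchanged_findLastIndex : Prop := ∀ (nums : List Int) (index : Int), Dom_findLastIndex nums index → Pre_findLastIndex nums index → Spec_findLastIndex nums index (findLastIndex nums index)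
def Claim_changed_findLastIndex : Prop := Dom_findLastIndex (pvDiffWitness_findLastIndex.1) (pvDiffWitness_findLastIndex.2) ∧ Pre_findLastIndex (pvDiffWitness_findLastIndex.1) (pvDiffWitness_findLastIndex.2) ∧ D_findLastIndex (pvDiffWitness_findLastIndex.1) (pvDiffWitness_findLastIndex.2) ∧ findLastIndex (pvDiffWitness_findLastIndex.1) (pvDiffWitness_findLastIndex.2) = pvDiffWitnessOut_findLastIndex.1 ∧ findLastIndex_alt (pvDiffWitness_findLastIndex.1) (pvDiffWitness_findLastIndex.2) = pvDiffWitnessOut_findLastIndex.2 ∧ pvDiffWitnessOut_findLastIndex.1 ≠ pvDiffWitnessOut_findLastIndex.2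
def Claim_exact_findLastIndex : Prop := ∀ (nums : List Int) (index : Int), Dom_findLastIndex nums index → Pre_findLastIndex nums index → D_findLastIndex nums index → findLastIndex nums index ≠ findLastIndex_alt nums index

-- ===== LEMMAS AND PROOFS =====

-- skipping an all-below-i prefix does not change the first element ≥ i
theorem altFirstGe_append_of_lt (i d : Int) (xs ys : List Int) (h : ∀ x ∈ xs, x < i) :
    altFirstGe i d (xs ++ ys) = altFirstGe i d ys := by
  induction xs with
  | nil => rfl
  | cons x xs ih =>
    have hx := h x (by simp)
    simp only [List.cons_append, altFirstGe, if_neg (by omega : ¬ x ≥ i)]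
    exact ih (fun y hy => h y (by simp [hy]))

-- Main invariant for a non-negative anchor: A's anchored scan from position s equals the first
-- run-end ≥ index among the run-ends computed from adjacent mismatches at positions ≥ s,
-- provided the element just before s still equals the anchor.
theorem loopA_eq_firstGe (nums : List Int) (index : Int) (_hidx : 0 ≤ index) :
    ∀ (fuel : Nat) (s : Int),
      fuel = ((nums.length : Int) - s).toNat → index + 1 ≤ s → s ≤ (nums.length : Int) →
      PySem.List.pyGet? nums (s - 1) = PySem.List.pyGet? nums index →
      findLastIndexLoopA nums index (nums.length : Int) s fuel
        = altFirstGe index ((nums.length : Int) - 1)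
            (((PySem.List.pyRange s (nums.length : Int) 1).filter
                (fun j => decide (PySem.List.pyGet? nums j ≠ PySem.List.pyGet? nums (j - 1)))).map (fun j => j - 1)
              ++ [(nums.length : Int) - 1]) := by
  intro fuel
  induction fuel with
  | zero =>
    intro s hf hs1 hs2 _
    have hsn : (nums.length : Int) ≤ s := by omega
    rw [PySem.List.pyRange_one_eq_nil hsn]
    simp only [List.filter_nil, List.map_nil, List.nil_append, findLastIndexLoopA, altFirstGe]
    rw [if_pos (by omega : (nums.length : Int) - 1 ≥ index)]
    omega
  | succ fuel ih =>
    intro s hf hs1 hs2 hprev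
    have hlt : s < (nums.length : Int) := by omega
    rw [PySem.List.pyRange_one_cons hlt]
    simp only [findLastIndexLoopA, if_pos hlt, List.filter_cons]
    by_cases hne : PySem.List.pyGet? nums s ≠ PySem.List.pyGet? nums index
    · have hmis : PySem.List.pyGet? nums s ≠ PySem.List.pyGet? nums (s - 1) := by
        rw [hprev]; exact hne
      rw [if_pos hne, if_pos (by simpa using hmis)]
      simp only [List.map_cons, List.cons_append, altFirstGe]
      rw [if_pos (by omega : s - 1 ≥ index)]
    · rw [ne_eq, not_not] at hne
      have hmis : ¬ (PySem.List.pyGet? nums s ≠ PySem.List.pyGet? nums (s - 1)) := by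
        rw [hprev, hne]; simp
      rw [if_neg (not_not_intro hne), if_neg (by simpa using hmis)]
      have := ih (s + 1) (by omega) (by omega) (by omega) (by simpa using hne)
      simpa using this

-- on a constant list A's loop never sees a mismatch and runs to the end
theorem loopA_const (nums : List Int) (index : Int) (v : Int)
    (hall : ∀ t : Int, -(nums.length : Int) ≤ t → t < (nums.length : Int) →
      PySem.List.pyGet? nums t = some v)
    (hanch : PySem.List.pyGet? nums index = some v) :
    ∀ (fuel : Nat) (s : Int),
      fuel = ((nums.length : Int) - s).toNat → -(nums.length : Int) ≤ s →
      s ≤ (nums.length : Int) →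
      findLastIndexLoopA nums index (nums.length : Int) s fuel = (nums.length : Int) - 1 := by
  intro fuel
  induction fuel with
  | zero =>
    intro s hf _ hs2
    simp only [findLastIndexLoopA]
    omega
  | succ fuel ih =>
    intro s hf hs1 hs2
    have hlt : s < (nums.length : Int) := by omega
    have hs : PySem.List.pyGet? nums s = some v := hall s hs1 hlt
    have heqq : ¬ (PySem.List.pyGet? nums s ≠ PySem.List.pyGet? nums index) := by
      rw [hs, hanch]; simp
    simp only [findLastIndexLoopA]
    rw [if_pos hlt, if_neg heqq]
    exact ih (s + 1) (by omega) (by omega) (by omega)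

-- in-range access into a list of elements all equal to v yields some v
theorem pyGet?_const (nums : List Int) (v : Int) (hconst : ∀ x ∈ nums, x = v)
    (t : Int) (h1 : -(nums.length : Int) ≤ t) (h2 : t < (nums.length : Int)) :
    PySem.List.pyGet? nums t = some v := by
  simp only [PySem.List.pyGet?, PySem.List.pyIdx?]
  by_cases h0 : 0 ≤ t
  · rw [if_pos h0, if_pos h2]
    have hk : t.toNat < nums.length := by omega
    simp only [Option.bind]
    rw [List.getElem?_eq_getElem hk]
    exact congrArg some (hconst _ (List.getElem_mem hk))
  · rw [if_neg h0, if_pos h1]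
    have hk : nums.length - (-t).toNat < nums.length := by omega
    simp only [Option.bind]
    rw [List.getElem?_eq_getElem hk]
    exact congrArg some (hconst _ (List.getElem_mem hk))

theorem findLastIndex_eq (nums : List Int) (index : Int)
    (hpre : Pre_findLastIndex nums index) (hnd : ¬ D_findLastIndex nums index) :
    findLastIndex nums index = findLastIndex_alt nums index := by
  unfold findLastIndex findLastIndex_alt
  by_cases hsmall : (nums.length : Int) ≤ index + 1
  · simp [hsmall]
  · have hlt : index + 1 < (nums.length : Int) := by omega
    simp only [ge_iff_le, if_neg (by omega : ¬ (nums.length : Int) ≤ index + 1)]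
    by_cases hneg : index < 0
    · -- negative in-range index: ¬D_ forces the list to be constant; both sides give n - 1
      have hin : -(nums.length : Int) ≤ index := by
        rcases hpre with h | h
        · omega
        · exact h
      have hne : nums ≠ [] := List.ne_nil_of_length_pos (by omega)
      have hconst : ∀ x ∈ nums, x = nums.getD 0 0 := by
        by_contra hc
        exact hnd ⟨hne, hin, hneg, hc⟩
      set v := nums.getD 0 0 with hv
      have hall := pyGet?_const nums v hconst
      have hanch : PySem.List.pyGet? nums index = some v :=
        hall index hin (by omega)
      rw [loopA_const nums index v hall hanch _ (index + 1) rfl (by omega) (by omega)]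
      -- B side: no adjacent mismatch, so ends = [n - 1]
      have hfilter :
          (PySem.List.pyRange 1 (nums.length : Int) 1).filter
            (fun j => decide (PySem.List.pyGet? nums j ≠ PySem.List.pyGet? nums (j - 1))) = [] := by
        rw [List.filter_eq_nil_iff]
        intro j hj
        rw [PySem.List.mem_pyRange_one] at hj
        simp only [decide_eq_true_eq, ne_eq, not_not]
        rw [hall j (by omega) (by omega), hall (j - 1) (by omega) (by omega)]
      unfold altEnds
      rw [hfilter]
      simp only [List.map_nil, List.nil_append, altFirstGe, if_pos hneg]
      rw [if_pos (by omega : (nums.length : Int) - 1 ≥ index + (nums.length : Int))]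
    · -- non-negative index: anchored scan = first run-end ≥ index
      have hidx0 : 0 ≤ index := by omega
      rw [if_neg hneg]
      unfold altEnds
      rw [PySem.List.pyRange_one_append 1 (index + 1) (nums.length : Int) (by omega) (by omega),
        List.filter_append, List.map_append, List.append_assoc]
      rw [altFirstGe_append_of_lt index _ _ _ (by
        intro x hx
        simp only [List.mem_map, List.mem_filter] at hx
        obtain ⟨j, ⟨hj, _⟩, rfl⟩ := hx
        rw [PySem.List.mem_pyRange_one] at hj
        omega)]
      have := loopA_eq_firstGe nums index hidx0 (((nums.length : Int) - (index + 1)).toNat)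
        (index + 1) rfl (by omega) (by omega) (by simp)
      simpa using this

-- B's lookup returns either the default or a list element at or beyond i
theorem altFirstGe_cases (i d : Int) (xs : List Int) :
    altFirstGe i d xs = d ∨ (altFirstGe i d xs ∈ xs ∧ i ≤ altFirstGe i d xs) := by
  induction xs with
  | nil => left; rfl
  | cons x xs ih =>
    simp only [altFirstGe]
    split_ifs with h
    · right; exact ⟨by simp, by omega⟩
    · rcases ih with h1 | ⟨h1, h2⟩
      · left; exact h1
      · right; exact ⟨by simp [h1], h2⟩

-- complete case analysis of A's loop: it stops one before the first anchor mismatch, or runs out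
theorem loopA_cases (nums : List Int) (index : Int) :
    ∀ (fuel : Nat) (s : Int), fuel = ((nums.length : Int) - s).toNat → s ≤ (nums.length : Int) →
      (∃ t, s ≤ t ∧ t < (nums.length : Int) ∧
        findLastIndexLoopA nums index (nums.length : Int) s fuel = t - 1 ∧
        PySem.List.pyGet? nums t ≠ PySem.List.pyGet? nums index ∧
        ∀ u, s ≤ u → u < t → PySem.List.pyGet? nums u = PySem.List.pyGet? nums index)
      ∨ (findLastIndexLoopA nums index (nums.length : Int) s fuel = (nums.length : Int) - 1 ∧
        ∀ u, s ≤ u → u < (nums.length : Int) → PySem.List.pyGet? nums u = PySem.List.pyGet? nums index) := by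
  intro fuel
  induction fuel with
  | zero =>
    intro s hf hs
    right
    refine ⟨?_, ?_⟩
    · simp only [findLastIndexLoopA]; omega
    · intro u hu1 hu2; omega
  | succ fuel ih =>
    intro s hf hs
    have hlt : s < (nums.length : Int) := by omega
    simp only [findLastIndexLoopA]
    rw [if_pos hlt]
    by_cases hne : PySem.List.pyGet? nums s ≠ PySem.List.pyGet? nums index
    · rw [if_pos hne]
      left
      exact ⟨s, le_refl s, hlt, rfl, hne, fun u hu1 hu2 => absurd hu1 (by omega)⟩
    · rw [if_neg hne, ne_eq, not_not] at *
      rcases ih (s + 1) (by omega) (by omega) with ⟨t, h1, h2, h3, h4, h5⟩ | ⟨h1, h2⟩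
      · left
        refine ⟨t, by omega, h2, h3, h4, fun u hu1 hu2 => ?_⟩
        by_cases hu : u = s
        · rw [hu]; exact hne
        · exact h5 u (by omega) hu2
      · right
        refine ⟨h1, fun u hu1 hu2 => ?_⟩
        by_cases hu : u = s
        · rw [hu]; exact hne
        · exact h2 u (by omega) hu2

-- a negative in-range Python index denotes position u + len
theorem pyGet?_neg_shift (nums : List Int) (u : Int)
    (h1 : -(nums.length : Int) ≤ u) (h2 : u < 0) :
    PySem.List.pyGet? nums u = PySem.List.pyGet? nums (u + (nums.length : Int)) := by
  simp only [PySem.List.pyGet?, PySem.List.pyIdx?]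
  rw [if_neg (by omega : ¬ 0 ≤ u), if_pos h1, if_pos (by omega : 0 ≤ u + (nums.length : Int)),
    if_pos (by omega : u + (nums.length : Int) < (nums.length : Int))]
  have : nums.length - (-u).toNat = (u + (nums.length : Int)).toNat := by omega
  rw [this]

-- when all adjacent pairs past position i agree, every run end before the last is below i
theorem alt_top (nums : List Int) (i : Int) (_h0 : 0 ≤ i) (hi : i < (nums.length : Int))
    (htail : ∀ j, i < j → j < (nums.length : Int) →
      PySem.List.pyGet? nums j = PySem.List.pyGet? nums (j - 1)) :
    altFirstGe i ((nums.length : Int) - 1) (altEnds nums (nums.length : Int))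
      = (nums.length : Int) - 1 := by
  unfold altEnds
  rw [altFirstGe_append_of_lt i _ _ _ (by
    intro x hx
    simp only [List.mem_map, List.mem_filter] at hx
    obtain ⟨j, ⟨hj, hmis⟩, rfl⟩ := hx
    rw [PySem.List.mem_pyRange_one] at hj
    by_contra hge
    have hji : i < j := by omega
    have := htail j hji (by omega)
    simp [this] at hmis)]
  simp only [altFirstGe]
  rw [if_pos (by omega : (nums.length : Int) - 1 ≥ i)]

-- ===== VERDICT (by name: the statement is the Claim_ definition above) =====
theorem findLastIndex_spec : Claim_unchanged_findLastIndex := by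
  intro nums index _ hpre hnd
  exact findLastIndex_eq nums index hpre hnd

theorem findLastIndex_changed : Claim_changed_findLastIndex := by
  unfold Claim_changed_findLastIndex; decide

theorem findLastIndex_tight : Claim_exact_findLastIndex := by
  unfold Claim_exact_findLastIndex
  intro nums index _ _ hD
  obtain ⟨hnil, hin, hneg, hnc⟩ := hD
  have hpos : 0 < nums.length := List.length_pos_of_ne_nil hnil
  unfold findLastIndex findLastIndex_alt
  simp only [ge_iff_le, if_neg (by omega : ¬ (nums.length : Int) ≤ index + 1)]
  rw [if_pos hneg]
  rcases loopA_cases nums index (((nums.length : Int) - (index + 1)).toNat) (index + 1) rfl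
      (by omega) with ⟨t, ht1, ht2, hres, htne, hall⟩ | ⟨hres, hall⟩
  · rw [hres]
    by_cases hts : 0 ≤ t
    · -- the whole wrapped tail (positions index+len+1 … len-1) equals the anchor,
      -- so B returns len-1 while A returns t-1 ≤ len-2
      have hanch : PySem.List.pyGet? nums index
          = PySem.List.pyGet? nums (index + (nums.length : Int)) :=
        pyGet?_neg_shift nums index hin hneg
      have htop : ∀ j, index + (nums.length : Int) < j → j < (nums.length : Int) →
          PySem.List.pyGet? nums j = PySem.List.pyGet? nums (j - 1) := by
        intro j hj1 hj2
        have ej : PySem.List.pyGet? nums j = PySem.List.pyGet? nums index := by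
          have hs := pyGet?_neg_shift nums (j - (nums.length : Int)) (by omega) (by omega)
          have harg : j - (nums.length : Int) + (nums.length : Int) = j := by ring
          rw [harg] at hs
          rw [← hs]
          exact hall (j - (nums.length : Int)) (by omega) (by omega)
        by_cases hj0 : j - 1 = index + (nums.length : Int)
        · rw [ej, hj0, ← hanch]
        · have ej1 : PySem.List.pyGet? nums (j - 1) = PySem.List.pyGet? nums index := by
            have hs := pyGet?_neg_shift nums (j - 1 - (nums.length : Int)) (by omega) (by omega)
            have harg : j - 1 - (nums.length : Int) + (nums.length : Int) = j - 1 := by ring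
            rw [harg] at hs
            rw [← hs]
            exact hall (j - 1 - (nums.length : Int)) (by omega) (by omega)
          rw [ej, ej1]
      rw [alt_top nums (index + (nums.length : Int)) (by omega) (by omega) htop]
      omega
    · -- A stopped on the raw negative counter: its value t-1 is negative, B's is not
      rcases altFirstGe_cases (index + (nums.length : Int)) ((nums.length : Int) - 1)
          (altEnds nums (nums.length : Int)) with hB | ⟨_, hge⟩
      · rw [hB]; omega
      · omega
  · -- A saw no mismatch anywhere: then the list is constant, contradicting D_
    exfalso
    apply hnc
    intro x hx
    obtain ⟨u, hu, rfl⟩ := List.mem_iff_getElem.mp hx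
    have e1 : PySem.List.pyGet? nums (u : Int) = PySem.List.pyGet? nums index :=
      hall (u : Int) (by omega) (by exact_mod_cast hu)
    have e0 : PySem.List.pyGet? nums ((0 : Nat) : Int) = PySem.List.pyGet? nums index :=
      hall ((0 : Nat) : Int) (by omega) (by exact_mod_cast hpos)
    rw [PySem.List.pyGet?_natCast] at e1 e0
    rw [List.getElem?_eq_getElem hu] at e1
    rw [List.getElem?_eq_getElem hpos] at e0
    have : some nums[u] = some nums[0] := by rw [e1, ← e0]
    have heq : nums[u] = nums[0] := Option.some_injective _ this
    rw [heq, List.getD_eq_getElem nums 0 hpos]
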